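-- pv_equiv track=rewrite | github.com/artradeskz/RuSi_py_cc | 9.py | parse_raw_tokens
-- ===== SOURCE A (Python) =====
-- def parse_raw_tokens(raw_tokens):
--     """Разбирает raw_tokens в список (тип, значение)"""
--     if not raw_tokens:
--         return []
--
--     result = []
--     parts = raw_tokens.split()
--
--     i = 0
--     while i < len(parts):
--         part = parts[i]
--
--         if part == 'LBRACKET:[':
--             bracket_parts = [part]
--             i += 1
--             while i < len(parts) and parts[i] != 'RBRACKET:]':
--                 bracket_parts.append(parts[i])
--                 i += 1
--             if i < len(parts):
--                 bracket_parts.append(parts[i])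
--                 i += 1
--             result.append(('LBRACKET', ' '.join(bracket_parts)))
--         elif part == 'MINUS:-':
--             result.append(('MINUS', '-'))
--             i += 1
--         elif part == 'PLUS:+':
--             result.append(('PLUS', '+'))
--             i += 1
--         elif ':' in part:
--             colon_idx = part.find(':')
--             token_type = part[:colon_idx]
--             token_value = part[colon_idx+1:]
--             result.append((token_type, token_value))
--             i += 1
--         else:
--             i += 1
--
--     return result
-- ===== SOURCE B (Python) =====
-- def parse_raw_tokens(raw_tokens):
--     """Single-pass state machine: no index arithmetic, no nested scan."""
--     if not raw_tokens:
--         return []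
--     result = []
--     buf = None  # None = normal mode; list = collecting a bracket group
--     for part in raw_tokens.split():
--         if buf is not None:
--             buf.append(part)
--             if part == 'RBRACKET:]':
--                 result.append(('LBRACKET', ' '.join(buf)))
--                 buf = None
--         elif part == 'LBRACKET:[':
--             buf = [part]
--         elif part == 'MINUS:-':
--             result.append(('MINUS', '-'))
--         elif part == 'PLUS:+':
--             result.append(('PLUS', '+'))
--         elif ':' in part:
--             ci = part.find(':')
--             result.append((part[:ci], part[ci+1:]))
--     if buf is not None:
--         result.append(('LBRACKET', ' '.join(buf)))
--     return result
-- ===== Notes on version B (the rewrite author's own statement) =====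
-- stated objective: alternative
-- what changed: Replaces A's index-driven outer while loop with a nested inner bracket scan by a single flat pass over the tokens using an explicit mode state (current bracket buffer or None), finalized once at the end.
import Mathlib
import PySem

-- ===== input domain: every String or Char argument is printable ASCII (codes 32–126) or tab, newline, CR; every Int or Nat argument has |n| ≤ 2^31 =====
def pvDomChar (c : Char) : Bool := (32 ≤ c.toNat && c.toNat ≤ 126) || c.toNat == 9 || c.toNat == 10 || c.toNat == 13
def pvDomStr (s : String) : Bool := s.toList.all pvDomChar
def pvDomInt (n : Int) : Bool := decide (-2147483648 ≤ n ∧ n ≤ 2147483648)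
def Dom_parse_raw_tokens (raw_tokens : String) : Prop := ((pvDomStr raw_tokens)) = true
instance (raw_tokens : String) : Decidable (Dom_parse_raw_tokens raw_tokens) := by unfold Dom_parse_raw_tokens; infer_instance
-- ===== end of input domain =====

-- B replaces A's index-driven while loop with nested bracket scan by a single flat
-- pass keeping an explicit mode state (bracket buffer or none); alternative, same cost.


-- ===== PORT A =====
-- inner while loop of A: collect tokens into bracket_parts until 'RBRACKET:]'
-- (which is appended too) or the list is exhausted; returns (bracket_parts, rest)
def collectA (acc : List String) : List String → (List String × List String)
  | [] => (acc, [])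
  | p :: r => if p == "RBRACKET:]" then (acc ++ [p], r) else collectA (acc ++ [p]) r

theorem collectA_snd_length (acc : List String) (l : List String) :
    (collectA acc l).2.length ≤ l.length := by
  induction l generalizing acc with
  | nil => simp [collectA]
  | cons p r ih =>
    simp only [collectA]
    split
    · simp
    · exact Nat.le_succ_of_le (ih _)

-- outer while loop of A, recursion on the remaining suffix of parts
def goA : List String → List (String × String)
  | [] => []
  | part :: rest =>
    if part == "LBRACKET:[" then
      ("LBRACKET", PySem.Str.join " " (collectA [part] rest).1) :: goA (collectA [part] rest).2
    else if part == "MINUS:-" then ("MINUS", "-") :: goA rest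
    else if part == "PLUS:+" then ("PLUS", "+") :: goA rest
    else if PySem.Str.isIn ":" part then
      let colon_idx := PySem.Str.find part ":"
      (PySem.Str.slice part none (some colon_idx),
       PySem.Str.slice part (some (colon_idx + 1)) none) :: goA rest
    else goA rest
termination_by l => l.length
decreasing_by
  · exact Nat.lt_succ_of_le (collectA_snd_length _ _)
  all_goals simp

def parse_raw_tokens (raw_tokens : String) : List (String × String) :=
  if raw_tokens == "" then [] else goA (PySem.Str.split₀ raw_tokens)

-- ===== PORT B =====
-- one step of B's flat pass: state = (result so far, optional bracket buffer)
def stepB (st : List (String × String) × Option (List String)) (part : String) :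
    List (String × String) × Option (List String) :=
  match st.2 with
  | some buf =>
    let buf' := buf ++ [part]
    if part == "RBRACKET:]" then (st.1 ++ [("LBRACKET", PySem.Str.join " " buf')], none)
    else (st.1, some buf')
  | none =>
    if part == "LBRACKET:[" then (st.1, some [part])
    else if part == "MINUS:-" then (st.1 ++ [("MINUS", "-")], none)
    else if part == "PLUS:+" then (st.1 ++ [("PLUS", "+")], none)
    else if PySem.Str.isIn ":" part then
      let ci := PySem.Str.find part ":"
      (st.1 ++ [(PySem.Str.slice part none (some ci),
                 PySem.Str.slice part (some (ci + 1)) none)], none)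
    else (st.1, none)

-- the trailing 'if buf is not None' finalisation of B
def finB (st : List (String × String) × Option (List String)) : List (String × String) :=
  match st.2 with
  | none => st.1
  | some buf => st.1 ++ [("LBRACKET", PySem.Str.join " " buf)]

def parse_raw_tokens_alt (raw_tokens : String) : List (String × String) :=
  if raw_tokens == "" then []
  else finB ((PySem.Str.split₀ raw_tokens).foldl stepB ([], none))

-- ===== PRECONDITION & SPEC =====
def Spec_parse_raw_tokens (raw_tokens : String) (out : List (String × String)) : Prop := out = parse_raw_tokens_alt raw_tokens
instance (raw_tokens : String) (out : List (String × String)) : Decidable (Spec_parse_raw_tokens raw_tokens out) := by unfold Spec_parse_raw_tokens; infer_instance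

-- ===== CLAIM (what is proved, stated in full; the proofs are below) =====
def Claim_equal_parse_raw_tokens : Prop := ∀ (raw_tokens : String), Dom_parse_raw_tokens raw_tokens → Spec_parse_raw_tokens raw_tokens (parse_raw_tokens raw_tokens)

-- ===== LEMMAS AND PROOFS =====
-- B's fold, run from either mode state, produces exactly A's remaining output.
theorem key (n : Nat) : ∀ (parts : List String), parts.length ≤ n →
    ∀ (res : List (String × String)),
      (finB (parts.foldl stepB (res, none)) = res ++ goA parts) ∧
      (∀ buf : List String,
        finB (parts.foldl stepB (res, some buf)) =
          res ++ ("LBRACKET", PySem.Str.join " " (collectA buf parts).1)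
              :: goA (collectA buf parts).2) := by
  induction n with
  | zero =>
    intro parts hlen res
    have : parts = [] := List.length_eq_zero_iff.mp (Nat.le_zero.mp hlen)
    subst this
    simp [finB, goA, collectA]
  | succ n ih =>
    intro parts hlen res
    match parts with
    | [] => simp [finB, goA, collectA]
    | part :: rest =>
      have hrest : rest.length ≤ n := by simpa using hlen
      constructor
      · -- normal mode
        by_cases h1 : part == "LBRACKET:["
        · have hcol : (collectA [part] rest).2.length ≤ n :=
            le_trans (collectA_snd_length _ _) hrest
          simp only [List.foldl_cons, stepB, h1, if_pos]
          rw [(ih rest hrest res).2 [part]]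
          rw [goA]
          simp [h1]
        · by_cases h2 : part == "MINUS:-"
          · simp only [List.foldl_cons, stepB]
            rw [if_neg (by simpa using h1), if_pos (by simpa using h2)]
            rw [(ih rest hrest _).1, goA]
            simp [h1, h2]
          · by_cases h3 : part == "PLUS:+"
            · simp only [List.foldl_cons, stepB]
              rw [if_neg (by simpa using h1), if_neg (by simpa using h2),
                  if_pos (by simpa using h3)]
              rw [(ih rest hrest _).1, goA]
              simp [h1, h2, h3]
            · by_cases h4 : PySem.Str.isIn ":" part
              · simp only [List.foldl_cons, stepB]
                rw [if_neg (by simpa using h1), if_neg (by simpa using h2),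
                    if_neg (by simpa using h3), if_pos (by simpa using h4)]
                rw [(ih rest hrest _).1, goA]
                simp only [h1, h2, h3, Bool.false_eq_true, if_false, List.append_assoc,
                  List.singleton_append, List.append_cancel_left_eq]
                rw [if_pos (by simpa using h4)]
              · simp only [List.foldl_cons, stepB]
                rw [if_neg (by simpa using h1), if_neg (by simpa using h2),
                    if_neg (by simpa using h3), if_neg (by simpa using h4)]
                rw [(ih rest hrest _).1, goA]
                simp only [h1, h2, h3, Bool.false_eq_true, if_false]
                rw [if_neg (by simpa using h4)]
      · -- bracket mode
        intro buf
        by_cases hr : part == "RBRACKET:]"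
        · simp only [List.foldl_cons, stepB, hr, if_pos]
          rw [(ih rest hrest _).1]
          simp [collectA, hr]
        · simp only [List.foldl_cons, stepB]
          rw [if_neg (by simpa using hr)]
          rw [(ih rest hrest res).2 (buf ++ [part])]
          simp [collectA, hr]

-- ===== VERDICT (by name: the statement is the Claim_ definition above) =====
theorem parse_raw_tokens_spec : Claim_equal_parse_raw_tokens := by
  intro raw _
  unfold Spec_parse_raw_tokens parse_raw_tokens parse_raw_tokens_alt
  by_cases h : raw == ""
  · simp [h]
  · simp only [h, Bool.false_eq_true]
    rw [(key (PySem.Str.split₀ raw).length (PySem.Str.split₀ raw) le_rfl []).1]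
    simp
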